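-- pv_equiv track=rewrite | github.com/Ai-Whisperers/ultrametric-antigen-AI | deliverables/partners/alejandra_rojas/scripts/denv4_degenerate_primer_design.py | _calculate_tm_range
-- ===== SOURCE A (Python) =====
-- def _calculate_tm_range(seq: str) -> tuple:
--     """Calculate Tm range for degenerate primer (Wallace rule)."""
--     min_gc = sum(1 for nt in seq if nt in 'GCS')  # Minimum GC (S=G/C counts once)
--     max_gc = sum(1 for nt in seq if nt in 'GCSRKMBDHV')  # Maximum GC
--
--     min_at = len(seq) - max_gc
--     max_at = len(seq) - min_gc
--
--     # Wallace rule: Tm = 2(A+T) + 4(G+C)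
--     min_tm = 2 * min_at + 4 * min_gc
--     max_tm = 2 * max_at + 4 * max_gc
--
--     return (min_tm, max_tm)
-- ===== SOURCE B (Python) =====
-- def _calculate_tm_range(seq: str) -> tuple:
--     """Calculate Tm range for degenerate primer (Wallace rule).
--
--     Single fused pass: each base is classified once (strong GC / ambiguous /
--     weak) and contributes its Wallace-rule term directly to both bounds,
--     replacing the two counting scans and the closed-form arithmetic of the
--     original.  Per A's range formula an ambiguous base adds 0 to the lower
--     bound and 6 to the upper one (it is subtracted from the minimum AT count
--     and counted as both AT and GC in the maximum).
--     """
--     lo = hi = 0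
--     for nt in seq:
--         if nt in 'GCS':
--             lo += 4
--             hi += 4
--         elif nt in 'RKMBDHV':
--             hi += 6
--         else:
--             lo += 2
--             hi += 2
--     return (lo, hi)
-- ===== Notes on version B (the rewrite author's own statement) =====
-- stated objective: alternative
-- what changed: B replaces A's two counting scans plus length/subtraction arithmetic with one fused pass that classifies each base once (strong/ambiguous/weak) and adds its per-base Wallace contribution directly to both running bounds.
import Mathlib
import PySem

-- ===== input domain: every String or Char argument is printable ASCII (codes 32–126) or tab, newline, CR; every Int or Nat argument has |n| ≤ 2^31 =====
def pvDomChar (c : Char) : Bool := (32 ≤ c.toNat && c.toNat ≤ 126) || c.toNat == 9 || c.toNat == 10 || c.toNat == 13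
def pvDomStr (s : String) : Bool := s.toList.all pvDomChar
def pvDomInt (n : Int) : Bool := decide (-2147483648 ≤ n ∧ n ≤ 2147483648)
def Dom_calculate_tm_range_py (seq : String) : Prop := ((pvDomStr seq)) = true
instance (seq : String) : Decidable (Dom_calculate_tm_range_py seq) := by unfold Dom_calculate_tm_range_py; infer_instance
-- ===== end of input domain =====

-- B fuses A's two counting scans and closed-form arithmetic into one pass that
-- classifies each base once and adds its Wallace contribution to both bounds (alternative decomposition).


-- ===== PORT A =====
-- 'nt in "GCS"' on a single character nt is membership among the string's chars
def calculate_tm_range_py (seq : String) : Int × Int :=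
  let min_gc : Int :=
    seq.toList.foldl (fun acc nt => if ("GCS".toList.contains nt) then acc + 1 else acc) 0
  let max_gc : Int :=
    seq.toList.foldl (fun acc nt => if ("GCSRKMBDHV".toList.contains nt) then acc + 1 else acc) 0
  let min_at : Int := (seq.toList.length : Int) - max_gc
  let max_at : Int := (seq.toList.length : Int) - min_gc
  let min_tm : Int := 2 * min_at + 4 * min_gc
  let max_tm : Int := 2 * max_at + 4 * max_gc
  (min_tm, max_tm)

-- ===== PORT B =====
def calculate_tm_range_py_alt (seq : String) : Int × Int :=
  seq.toList.foldl
    (fun (p : Int × Int) nt =>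
      if "GCS".toList.contains nt then (p.1 + 4, p.2 + 4)
      else if "RKMBDHV".toList.contains nt then (p.1, p.2 + 6)
      else (p.1 + 2, p.2 + 2))
    (0, 0)

-- ===== PRECONDITION & SPEC =====
def Spec_calculate_tm_range_py (seq : String) (out : Int × Int) : Prop := out = calculate_tm_range_py_alt seq
instance (seq : String) (out : Int × Int) : Decidable (Spec_calculate_tm_range_py seq out) := by unfold Spec_calculate_tm_range_py; infer_instance

-- ===== CLAIM (what is proved, stated in full; the proofs are below) =====
def Claim_equal_calculate_tm_range_py : Prop := ∀ (seq : String), Dom_calculate_tm_range_py seq → Spec_calculate_tm_range_py seq (calculate_tm_range_py seq)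

-- ===== LEMMAS AND PROOFS =====

-- the ten-letter alphabet is exactly the union of the strong-GC and ambiguous alphabets
theorem big_eq_or (c : Char) :
    "GCSRKMBDHV".toList.contains c
      = ("GCS".toList.contains c || "RKMBDHV".toList.contains c) := by
  simp [Bool.or_assoc]

-- B's fused pass, from any accumulator, equals A's counts-and-arithmetic form
theorem b_fold_eq (xs : List Char) : ∀ lo hi : Int,
    xs.foldl
      (fun (p : Int × Int) nt =>
        if "GCS".toList.contains nt then (p.1 + 4, p.2 + 4)
        else if "RKMBDHV".toList.contains nt then (p.1, p.2 + 6)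
        else (p.1 + 2, p.2 + 2))
      (lo, hi)
    = (lo + 2 * (xs.length : Int)
          + 4 * ((xs.countP (fun c => "GCS".toList.contains c) : Nat) : Int)
          - 2 * ((xs.countP (fun c => "GCSRKMBDHV".toList.contains c) : Nat) : Int),
       hi + 2 * (xs.length : Int)
          - 2 * ((xs.countP (fun c => "GCS".toList.contains c) : Nat) : Int)
          + 4 * ((xs.countP (fun c => "GCSRKMBDHV".toList.contains c) : Nat) : Int)) := by
  induction xs with
  | nil => intro lo hi; simp
  | cons c xs ih =>
    intro lo hi
    simp only [List.foldl_cons, List.countP_cons, List.length_cons]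
    by_cases hG : "GCS".toList.contains c = true
    · have hB : "GCSRKMBDHV".toList.contains c = true := by
        rw [big_eq_or, hG]; rfl
      simp only [hG, hB, if_true, ih, Prod.mk.injEq]
      push_cast
      constructor <;> ring
    · by_cases hR : "RKMBDHV".toList.contains c = true
      · have hB : "GCSRKMBDHV".toList.contains c = true := by
          rw [big_eq_or, hR, Bool.or_true]
        simp only [hG, hR, hB, if_true, ih, Prod.mk.injEq]
        push_cast
        constructor <;> ring
      · have hB : "GCSRKMBDHV".toList.contains c = false := by
          rw [big_eq_or, Bool.eq_false_iff.mpr hG, Bool.eq_false_iff.mpr hR]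
          rfl
        simp only [hG, hR, hB, ih, Prod.mk.injEq]
        push_cast
        constructor <;> ring

-- ===== VERDICT (by name: the statement is the Claim_ definition above) =====
theorem calculate_tm_range_py_spec : Claim_equal_calculate_tm_range_py := by
  intro seq _
  unfold Spec_calculate_tm_range_py calculate_tm_range_py calculate_tm_range_py_alt
  rw [b_fold_eq seq.toList 0 0,
      PySem.List.foldl_if_add_one, PySem.List.foldl_if_add_one]
  dsimp only
  simp only [Prod.mk.injEq]
  constructor <;> ring
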